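-- pv_equiv track=rewrite | github.com/ascv0228/nsysu--CT | no_noise/no_noise_Hsinche.py | getImgListbyCaseDict
-- ===== SOURCE A (Python) =====
-- def getImgListbyCaseDict(ImgList):
--     outputDict = dict()
--     for i in ImgList:
--         key = i[:i.find("_")]
--         if key not in outputDict:
--             outputDict[key] = [i]
--         else:
--             outputDict[key].append(i)
--
--     return outputDict
-- ===== SOURCE B (Python) =====
-- def getImgListbyCaseDict(ImgList):
--     def key(i):
--         return i[:i.find("_")]
--     return {k: [i for i in ImgList if key(i) == k]
--             for k in dict.fromkeys(map(key, ImgList))}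
-- ===== Notes on version B (the rewrite author's own statement) =====
-- stated objective: alternative
-- what changed: Replaces the incremental dict accumulation (insert-or-append per element) by first collecting the distinct prefix keys in order of first appearance (dict.fromkeys) and then building each group in one comprehension that filters the whole list per key.
import Mathlib
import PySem

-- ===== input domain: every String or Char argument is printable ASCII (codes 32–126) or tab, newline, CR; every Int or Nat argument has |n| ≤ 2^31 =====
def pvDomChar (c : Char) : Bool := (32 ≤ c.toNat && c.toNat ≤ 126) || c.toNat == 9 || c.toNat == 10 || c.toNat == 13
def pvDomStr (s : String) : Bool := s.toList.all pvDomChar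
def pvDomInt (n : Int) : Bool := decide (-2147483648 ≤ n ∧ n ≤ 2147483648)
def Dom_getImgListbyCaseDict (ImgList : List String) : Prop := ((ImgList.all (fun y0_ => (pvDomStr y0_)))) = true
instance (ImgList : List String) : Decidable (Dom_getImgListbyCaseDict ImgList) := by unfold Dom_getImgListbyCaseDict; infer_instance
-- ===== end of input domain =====

-- B collects the distinct prefix keys first (dict.fromkeys) and builds each group by filtering
-- the input once per key, instead of A's element-by-element dict accumulation. Alternative
-- decomposition; no speed claim.

-- shared key expression: i[:i.find("_")] (identical in both Python sources)
def pvKey (i : String) : String := PySem.Str.slice i none (some (PySem.Str.find i "_"))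

-- ===== PORT A =====
def getImgListbyCaseDict (ImgList : List String) : List (String × List String) :=
  (ImgList.foldl (fun d i =>
      let key := pvKey i
      if d.contains key = false then d.insert key [i]
      else d.modify key [] (fun l => l ++ [i]))
    PySem.Dict.empty).items

-- ===== PORT B =====
def getImgListbyCaseDict_alt (ImgList : List String) : List (String × List String) :=
  (PySem.List.dedup (ImgList.map pvKey)).map
    (fun k => (k, ImgList.filter (fun i => pvKey i == k)))

-- ===== PRECONDITION & SPEC =====
def Spec_getImgListbyCaseDict (ImgList : List String) (out : List (String × List String)) : Prop := out = getImgListbyCaseDict_alt ImgList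
instance (ImgList : List String) (out : List (String × List String)) : Decidable (Spec_getImgListbyCaseDict ImgList out) := by unfold Spec_getImgListbyCaseDict; infer_instance

-- ===== CLAIM (what is proved, stated in full; the proofs are below) =====
def Claim_equal_getImgListbyCaseDict : Prop := ∀ (ImgList : List String), Dom_getImgListbyCaseDict ImgList → Spec_getImgListbyCaseDict ImgList (getImgListbyCaseDict ImgList)

-- ===== LEMMAS AND PROOFS =====

-- A's insert-or-append step is exactly dict-modify-with-default-[].
theorem pv_step_eq (d : PySem.Dict String (List String)) (i : String) :
    (if d.contains (pvKey i) = false then d.insert (pvKey i) [i]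
     else d.modify (pvKey i) [] (fun l => l ++ [i]))
      = d.modify (pvKey i) [] (fun l => l ++ [i]) := by
  by_cases h : d.contains (pvKey i) = false
  · simp [PySem.Dict.insert, PySem.Dict.modify, PySem.Dict.getD_of_not_contains, h]
  · simp [h]

-- a Nodup-keyed dict is the map of (key, getD key []) over its keys
theorem pv_items_eq_map_keys (d : PySem.Dict String (List String)) (h : d.keys.Nodup) :
    d.items = d.keys.map (fun k => (k, d.getD k [])) := by
  have : d.keys.map (fun k => (k, d.getD k [])) = d.items.map (fun p => (p.1, d.getD p.1 [])) := by
    simp [PySem.Dict.keys, List.map_map]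
  rw [this]
  have : d.items.map (fun p => (p.1, d.getD p.1 [])) = d.items.map id := by
    apply List.map_congr_left
    intro p hp
    have := PySem.Dict.getD_of_mem_items (d := d) (k := p.1) (v := p.2) (d0 := []) (by simpa using hp) h
    simp [this]
  simp [this]

theorem getImgListbyCaseDict_spec' (ImgList : List String) :
    getImgListbyCaseDict ImgList = getImgListbyCaseDict_alt ImgList := by
  unfold getImgListbyCaseDict getImgListbyCaseDict_alt
  simp only [pv_step_eq]
  -- rewrite the key-applied fold as a fold over (key, element) pairs
  have hfold :
      ImgList.foldl (fun d i => d.modify (pvKey i) [] (fun l => l ++ [i])) PySem.Dict.empty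
        = (ImgList.map (fun i => (pvKey i, i))).foldl
            (fun d p => d.modify p.1 [] (fun l => l ++ [p.2])) PySem.Dict.empty := by
    rw [List.foldl_map]
  rw [hfold]
  set pairs := ImgList.map (fun i => (pvKey i, i)) with hpairs
  set D := pairs.foldl (fun d p => d.modify p.1 [] (fun l => l ++ [p.2])) PySem.Dict.empty with hD
  have hkeys : D.keys = PySem.Set.ofList (ImgList.map pvKey) := by
    rw [hD]
    have h1 := PySem.Dict.keys_foldl_modify_key (l := pairs) (key := Prod.fst)
      (d0 := ([] : List String)) (f := fun _ p => (fun l => l ++ [p.2])) (d := PySem.Dict.empty)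
    rw [h1]
    simp only [hpairs, List.map_map, PySem.Dict.keys_empty, Function.comp_def]
    rfl
  have hnodup : D.keys.Nodup := by
    rw [hkeys]
    exact PySem.Set.nodup_ofList _
  have hgetD : ∀ k, D.getD k [] = ImgList.filter (fun i => pvKey i == k) := by
    intro k
    rw [hD]
    rw [PySem.Dict.getD_foldl_modify_append]
    simp only [PySem.Dict.getD_empty, List.nil_append, hpairs, List.filter_map, List.map_map]
    simp [Function.comp_def]
  rw [pv_items_eq_map_keys D hnodup, hkeys]
  simp only [PySem.List.dedup_eq_ofList]
  apply List.map_congr_left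
  intro k _
  rw [hgetD]

-- ===== VERDICT (by name: the statement is the Claim_ definition above) =====
theorem getImgListbyCaseDict_spec : Claim_equal_getImgListbyCaseDict := by
  intro ImgList _
  exact getImgListbyCaseDict_spec' ImgList
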